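-- pv_equiv track=rewrite | github.com/pypi-data/pypi-mirror-401 | packages/mmar-utils/mmar_utils-1.1.17.tar.gz/mmar_utils-1.1.17/src/mmar_utils/utils_texts.py | chunk_respect_semantic
-- ===== SOURCE A (Python) =====
-- def rindex_safe(text, sub, end) -> int | None:
--     try:
--         return text.rindex(sub, 0, end)
--     except ValueError:
--         return None
--
-- def chunk_respect_semantic(text: str, max_chunk_size: int) -> list[str]:
--     """
--     This function tries to chunk respecting
--     - sections ( starts with '#' )
--     - paragraphs
--     - lines
--     - words
--     This function is slow: assumed that `len(text) / max_chunk_size` is small, e.g. < 10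
--     """
--     text = text.strip()
--
--     if len(text) < max_chunk_size:
--         return [text]
--
--     split_separators = [
--         "\n#",
--         "\n\n",
--         "\n",
--         " ",
--     ]
--
--     for sep in split_separators:
--         pos = rindex_safe(text, sep, max_chunk_size)
--         if pos is None:
--             continue
--         parts = [text[:pos], text[pos:]]
--         res = [pt for pts in parts for pt in chunk_respect_semantic(pts, max_chunk_size)]
--         res = [pt for pt in res if pt]
--         return res
--
--     res = [
--         text[:max_chunk_size].strip(),
--         *chunk_respect_semantic(text[max_chunk_size:], max_chunk_size),
--     ]
--     res = [pt for pt in res if pt]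
--     return res
-- ===== SOURCE B (Python) =====
-- def chunk_respect_semantic(text: str, max_chunk_size: int) -> list[str]:
--     """Iterative re-implementation: an explicit worklist of pending substrings
--     replaces the recursion, pieces are emitted left-to-right into `results`,
--     and empty strings are filtered out once at the end."""
--     text = text.strip()
--     if len(text) < max_chunk_size:
--         return [text]
--
--     split_separators = ["\n#", "\n\n", "\n", " "]
--
--     results = []
--     stack = [text]
--     while stack:
--         cur = stack.pop().strip()
--         if len(cur) < max_chunk_size:
--             results.append(cur)
--             continue
--         for sep in split_separators:
--             pos = cur.rfind(sep, 0, max_chunk_size)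
--             if pos != -1:
--                 stack.append(cur[pos:])
--                 stack.append(cur[:pos])
--                 break
--         else:
--             results.append(cur[:max_chunk_size].strip())
--             stack.append(cur[max_chunk_size:])
--     return [p for p in results if p]
-- ===== Notes on version B (the rewrite author's own statement) =====
-- stated objective: alternative
-- what changed: Replaces the recursive splitter (which re-filters empty pieces at every recursion level) by an iterative explicit worklist/stack of pending substrings that emits leaf pieces left-to-right and filters empty strings once at the end.
import Mathlib
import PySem

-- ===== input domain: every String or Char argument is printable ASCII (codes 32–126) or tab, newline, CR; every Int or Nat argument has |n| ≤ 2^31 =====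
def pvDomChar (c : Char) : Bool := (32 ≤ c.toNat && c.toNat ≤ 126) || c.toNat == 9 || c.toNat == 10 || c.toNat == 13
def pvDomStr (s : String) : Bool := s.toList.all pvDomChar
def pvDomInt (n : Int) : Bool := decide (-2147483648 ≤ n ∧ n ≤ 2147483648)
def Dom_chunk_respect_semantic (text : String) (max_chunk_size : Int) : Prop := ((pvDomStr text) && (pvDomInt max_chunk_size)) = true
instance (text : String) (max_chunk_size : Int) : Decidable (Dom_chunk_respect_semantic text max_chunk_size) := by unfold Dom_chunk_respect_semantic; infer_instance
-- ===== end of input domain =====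

-- B replaces A's recursive splitter by an explicit worklist loop with one final
-- empty-filter (objective: alternative decomposition, same cost).
-- Both ports work on the code-point list (PySem.Chars) and are made total with a
-- fuel guard; when max_chunk_size ≥ 1 (= Pre_) the chosen fuel always suffices.
-- Outside Pre_ the Python programs recurse/loop forever (RecursionError).

-- ===== PORT A =====

-- the module-level list `split_separators`
def pvSeps : List (List Char) := [['\n', '#'], ['\n', '\n'], ['\n'], [' ']]

-- `rindex_safe(text, sub, end)`: str.rindex raises ValueError exactly where rfind = -1
def rindexSafe (t sub : List Char) (e : Int) : Option Int :=
  let r := PySem.Chars.rfindFrom t sub 0 (some e)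
  if r = -1 then none else some r

-- the `for sep in split_separators` scan: first separator found, its position
def pvFindSepA (t : List Char) (m : Int) : List (List Char) → Option Int
  | [] => none
  | sep :: rest =>
    match rindexSafe t sep m with
    | some p => some p
    | none => pvFindSepA t m rest

-- A's recursion, fuel-guarded (none = fuel exhausted, only reachable where Python recurses forever)
def chunkA (fuel : Nat) (text : List Char) (m : Int) : Option (List (List Char)) :=
  match fuel with
  | 0 => none
  | fuel + 1 =>
    let t := PySem.Chars.strip text
    if (t.length : Int) < m then some [t]
    else
      match pvFindSepA t m pvSeps with
      | some pos => do
          let l ← chunkA fuel (PySem.List.slice t none (some pos)) m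
          let r ← chunkA fuel (PySem.List.slice t (some pos) none) m
          pure ((l ++ r).filter (fun pt => !pt.isEmpty))
      | none => do
          let rest ← chunkA fuel (PySem.List.slice t (some m) none) m
          pure ((PySem.Chars.strip (PySem.List.slice t none (some m)) :: rest).filter (fun pt => !pt.isEmpty))

def chunk_respect_semantic (text : String) (max_chunk_size : Int) : List String :=
  ((chunkA (text.toList.length + 1) text.toList max_chunk_size).getD []).map String.ofList

-- ===== PORT B =====

-- B's `for sep ...: pos = cur.rfind(sep, 0, m); if pos != -1: ... break` scan
def pvScanSepsB (s : List Char) (m : Int) : List (List Char) → Option Int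
  | [] => none
  | sep :: rest =>
    let p := PySem.Chars.rfindFrom s sep 0 (some m)
    if p ≠ -1 then some p else pvScanSepsB s m rest

-- B's while-loop over the worklist (Python list-as-stack, top of stack = list head),
-- fuel-guarded like A's recursion
def loopB (fuel : Nat) (m : Int) (stack results : List (List Char)) : Option (List (List Char)) :=
  match fuel, stack with
  | _, [] => some results
  | 0, _ :: _ => none
  | fuel + 1, cur :: rest =>
    let s := PySem.Chars.strip cur
    if (s.length : Int) < m then loopB fuel m rest (results ++ [s])
    else
      match pvScanSepsB s m pvSeps with
      | some pos =>
          loopB fuel m (PySem.List.slice s none (some pos) :: PySem.List.slice s (some pos) none :: rest) results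
      | none =>
          loopB fuel m (PySem.List.slice s (some m) none :: rest)
            (results ++ [PySem.Chars.strip (PySem.List.slice s none (some m))])

def chunk_respect_semantic_alt (text : String) (max_chunk_size : Int) : List String :=
  let t := PySem.Chars.strip text.toList
  if (t.length : Int) < max_chunk_size then [String.ofList t]
  else
    (((loopB (4 ^ t.length + 1) max_chunk_size [t] []).getD []).filter (fun p => !p.isEmpty)).map String.ofList

-- ===== PRECONDITION & SPEC =====

-- For max_chunk_size ≤ 0 the base case `len(text) < max_chunk_size` is unreachable,
-- A recurses forever and raises RecursionError; Pre_ excludes exactly those inputs.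
def Pre_chunk_respect_semantic (text : String) (max_chunk_size : Int) : Prop := 1 ≤ max_chunk_size
instance (text : String) (max_chunk_size : Int) : Decidable (Pre_chunk_respect_semantic text max_chunk_size) := by unfold Pre_chunk_respect_semantic; infer_instance

def pvWitness_chunk_respect_semantic : String × Int := ("# title\nhello world, a test\n\nof chunking", 9)

def Spec_chunk_respect_semantic (text : String) (max_chunk_size : Int) (out : List String) : Prop := out = chunk_respect_semantic_alt text max_chunk_size
instance (text : String) (max_chunk_size : Int) (out : List String) : Decidable (Spec_chunk_respect_semantic text max_chunk_size out) := by unfold Spec_chunk_respect_semantic; infer_instance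

-- ===== CLAIM (what is proved, stated in full; the proofs are below) =====
def Claim_equal_chunk_respect_semantic : Prop := ∀ (text : String) (max_chunk_size : Int), Dom_chunk_respect_semantic text max_chunk_size → Pre_chunk_respect_semantic text max_chunk_size → Spec_chunk_respect_semantic text max_chunk_size (chunk_respect_semantic text max_chunk_size)

-- ===== LEMMAS AND PROOFS =====

-- A's recursion at canonical fuel (proof-only abbreviation)
def cAx (m : Int) (t : List Char) : List (List Char) :=
  (chunkA (t.length + 1) t m).getD []

-- the emitted-piece filter
def pvF (l : List (List Char)) : List (List Char) := l.filter (fun pt => !pt.isEmpty)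

-- worklist measure
def mu (stack : List (List Char)) : Nat := (stack.map (fun s => 4 ^ s.length)).sum

lemma pvF_append (a b : List (List Char)) : pvF (a ++ b) = pvF a ++ pvF b := by
  simp [pvF]

lemma pvF_idem (l : List (List Char)) : pvF (pvF l) = pvF l := by
  simp [pvF, List.filter_filter]

lemma strip_length_le (s : List Char) : (PySem.Chars.strip s).length ≤ s.length := by
  simp only [PySem.Chars.strip, PySem.Chars.rstrip, PySem.Chars.lstrip, List.length_reverse]
  calc (List.dropWhile PySem.Chars.isspace (List.dropWhile PySem.Chars.isspace s).reverse).length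
      ≤ (List.dropWhile PySem.Chars.isspace s).reverse.length := List.length_dropWhile_le _ _
    _ ≤ s.length := by simpa using List.length_dropWhile_le PySem.Chars.isspace s

lemma rstrip_prefix (x : List Char) : PySem.Chars.rstrip x <+: x := by
  have h := List.dropWhile_suffix (l := x.reverse) PySem.Chars.isspace
  have := (List.reverse_prefix (l₁ := List.dropWhile PySem.Chars.isspace x.reverse) (l₂ := x.reverse)).mpr h
  simpa [PySem.Chars.rstrip] using this

lemma head_dropWhile_false (p : Char → Bool) (l : List Char) (c : Char) (r : List Char)
    (h : l.dropWhile p = c :: r) : p c = false := by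
  induction l with
  | nil => simp at h
  | cons a t ih =>
    rw [List.dropWhile_cons] at h
    split at h
    · exact ih h
    · next hp => cases h; simpa using hp

lemma strip_head_not_space (s : List Char) (c : Char) (rest : List Char)
    (h : PySem.Chars.strip s = c :: rest) : PySem.Chars.isspace c = false := by
  have hp : PySem.Chars.strip s <+: PySem.Chars.lstrip s := rstrip_prefix _
  rw [h] at hp
  obtain ⟨t, ht⟩ := hp
  exact head_dropWhile_false _ s c _ (by simpa [PySem.Chars.lstrip] using ht.symm)

lemma strip_idem (s : List Char) : PySem.Chars.strip (PySem.Chars.strip s) = PySem.Chars.strip s := by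
  have hl : PySem.Chars.lstrip (PySem.Chars.strip s) = PySem.Chars.strip s := by
    cases h : PySem.Chars.strip s with
    | nil => simp [PySem.Chars.lstrip]
    | cons c r => simp [PySem.Chars.lstrip, strip_head_not_space s c r h]
  have hrev : (PySem.Chars.strip s).reverse
      = List.dropWhile PySem.Chars.isspace (PySem.Chars.lstrip s).reverse := by
    simp [PySem.Chars.strip, PySem.Chars.rstrip]
  have hr : PySem.Chars.rstrip (PySem.Chars.strip s) = PySem.Chars.strip s := by
    rw [PySem.Chars.rstrip, hrev, List.dropWhile_idempotent, ← hrev]; simp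
  rw [PySem.Chars.strip, hl, hr]

lemma rfind_go_spec (s sub : List Char) :
    ∀ j : Nat, PySem.Chars.rfind.go s sub j ≠ -1 →
      ∃ p : Nat, PySem.Chars.rfind.go s sub j = (p : Int) ∧ p ≤ j ∧ sub <+: s.drop p := by
  intro j
  induction j with
  | zero =>
    intro h
    have e : PySem.Chars.rfind.go s sub 0 = if sub.isPrefixOf s then (0:Int) else -1 := rfl
    rw [e] at h ⊢
    split at h
    · next hp => exact ⟨0, by simp [hp], le_refl 0, by simpa using List.isPrefixOf_iff_prefix.mp hp⟩
    · simp at h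
  | succ j ih =>
    intro h
    have e : PySem.Chars.rfind.go s sub (j+1)
        = if sub.isPrefixOf (s.drop (j+1)) then ((j+1 : Nat) : Int) else PySem.Chars.rfind.go s sub j := rfl
    rw [e] at h ⊢
    split at h <;> split
    · next hp _ => exact ⟨j+1, rfl, le_refl _, List.isPrefixOf_iff_prefix.mp hp⟩
    · next hp hnp => exact absurd hp hnp
    · next hnp hp => exact absurd hp hnp
    · obtain ⟨p, hp1, hp2, hp3⟩ := ih h
      exact ⟨p, hp1, Nat.le_succ_of_le hp2, hp3⟩

lemma rfind_spec (t sub : List Char) (h : PySem.Chars.rfind t sub ≠ -1) :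
    ∃ p : Nat, PySem.Chars.rfind t sub = (p : Int) ∧ sub <+: t.drop p ∧ p + sub.length ≤ t.length := by
  obtain ⟨p, h1, h2, h3⟩ := rfind_go_spec (s := t) sub t.length h
  refine ⟨p, h1, h3, ?_⟩
  have := h3.length_le
  simp [List.length_drop] at this
  omega

lemma rindexSafe_spec (t sub : List Char) (m : Int) (hm : 1 ≤ m) (pos : Int)
    (h : rindexSafe t sub m = some pos) :
    ∃ p : Nat, pos = (p : Int) ∧ sub <+: t.drop p ∧ p + sub.length ≤ t.length := by
  rw [rindexSafe] at h
  simp only [PySem.Chars.rfindFrom] at h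
  have h00 : ¬ ((0:Int) < 0) := by omega
  have hm0 : ¬ (m < 0) := by omega
  simp only [h00, if_false, hm0, Int.toNat_zero, List.drop_zero, zero_add] at h
  have he : ¬ ((if (t.length : Int) < m then (t.length : Int) else m) < 0) := by
    split <;> omega
  rw [if_neg he] at h
  set r := PySem.Chars.rfind
      (List.take (if (t.length : Int) < m then (t.length : Int) else m).toNat t) sub with hrdef
  by_cases hr : r = -1
  · rw [if_pos hr, if_pos rfl] at h; cases h
  · rw [if_neg hr, if_neg hr] at h
    rw [Option.some_inj] at h
    obtain ⟨p, h1, h2, h3⟩ := rfind_spec _ sub hr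
    refine ⟨p, by rw [← h, hrdef, h1], ?_, ?_⟩
    · have : (List.take (if (t.length : Int) < m then (t.length : Int) else m).toNat t).drop p
          <+: t.drop p := by
        rw [List.drop_take]
        exact List.take_prefix _ _
      exact h2.trans this
    · have hlen : (List.take (if (t.length : Int) < m then (t.length : Int) else m).toNat t).length
          ≤ t.length := by simp
      omega

-- every separator is nonempty and starts with a whitespace character
def goodSep (sep : List Char) : Prop := ∃ c cs, sep = c :: cs ∧ PySem.Chars.isspace c = true

lemma findSep_bounds (u : List Char) (m : Int) (hm : 1 ≤ m) :
    ∀ (L : List (List Char)), (∀ sep ∈ L, goodSep sep) → ∀ pos : Int,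
      pvFindSepA (PySem.Chars.strip u) m L = some pos →
      ∃ p : Nat, pos = (p : Int) ∧ 1 ≤ p ∧ p < (PySem.Chars.strip u).length := by
  intro L
  induction L with
  | nil => intro _ pos h; simp [pvFindSepA] at h
  | cons sep rest ih =>
    intro hg pos h
    rw [pvFindSepA] at h
    cases hri : rindexSafe (PySem.Chars.strip u) sep m with
    | none => rw [hri] at h; exact ih (fun s hs => hg s (List.mem_cons_of_mem _ hs)) pos h
    | some q =>
      rw [hri, Option.some_inj] at h
      subst h
      obtain ⟨p, h1, h2, h3⟩ := rindexSafe_spec _ _ m hm q hri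
      obtain ⟨c, cs, hsep, hc⟩ := hg sep List.mem_cons_self
      refine ⟨p, h1, ?_, by rw [hsep] at h3; simp at h3; omega⟩
      by_contra hp0
      have hp : p = 0 := by omega
      subst hp
      rw [List.drop_zero, hsep] at h2
      obtain ⟨t2, ht2⟩ := h2
      have : PySem.Chars.isspace c = false :=
        strip_head_not_space u c (cs ++ t2) (by rw [← ht2]; simp)
      rw [hc] at this; cases this

lemma seps_good : ∀ sep ∈ pvSeps, goodSep sep := by
  intro sep hs
  fin_cases hs <;> exact ⟨_, _, rfl, by decide⟩

lemma scan_eq_find (s : List Char) (m : Int) :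
    ∀ L : List (List Char), pvScanSepsB s m L = pvFindSepA s m L := by
  intro L
  induction L with
  | nil => rfl
  | cons sep rest ih =>
    simp only [pvScanSepsB, pvFindSepA, rindexSafe]
    by_cases h : PySem.Chars.rfindFrom s sep 0 (some m) = -1 <;> simp [h, ih]

lemma chunkA_succ_small (f : Nat) (t : List Char) (m : Int)
    (h : ((PySem.Chars.strip t).length : Int) < m) :
    chunkA (f + 1) t m = some [PySem.Chars.strip t] := by
  rw [chunkA]
  simp only [if_pos h]

lemma chunkA_succ_sep (f : Nat) (t : List Char) (m : Int) (pos : Int)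
    (hb : ¬ ((PySem.Chars.strip t).length : Int) < m)
    (hfind : pvFindSepA (PySem.Chars.strip t) m pvSeps = some pos) :
    chunkA (f + 1) t m = (do
      let l ← chunkA f (PySem.List.slice (PySem.Chars.strip t) none (some pos)) m
      let r ← chunkA f (PySem.List.slice (PySem.Chars.strip t) (some pos) none) m
      pure ((l ++ r).filter (fun pt => !pt.isEmpty))) := by
  rw [chunkA]
  simp only [if_neg hb, hfind]

lemma chunkA_succ_nosep (f : Nat) (t : List Char) (m : Int)
    (hb : ¬ ((PySem.Chars.strip t).length : Int) < m)
    (hfind : pvFindSepA (PySem.Chars.strip t) m pvSeps = none) :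
    chunkA (f + 1) t m = (do
      let rest ← chunkA f (PySem.List.slice (PySem.Chars.strip t) (some m) none) m
      pure ((PySem.Chars.strip (PySem.List.slice (PySem.Chars.strip t) none (some m)) :: rest).filter
        (fun pt => !pt.isEmpty))) := by
  rw [chunkA]
  simp only [if_neg hb, hfind]

lemma chunkA_some_irrel (m : Int) (hm : 1 ≤ m) :
    ∀ fuel t, t.length < fuel →
      chunkA fuel t m = chunkA (t.length + 1) t m ∧ ∃ r, chunkA fuel t m = some r := by
  intro fuel
  induction fuel using Nat.strong_induction_on with
  | _ fuel IH =>
    intro t ht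
    match fuel, ht with
    | f + 1, ht =>
      have hf : t.length ≤ f := by omega
      have hsl : (PySem.Chars.strip t).length ≤ t.length := strip_length_le t
      set s := PySem.Chars.strip t with hsdef
      by_cases hb : (s.length : Int) < m
      · rw [chunkA_succ_small f t m hb, chunkA_succ_small t.length t m hb]
        exact ⟨rfl, ⟨[s], rfl⟩⟩
      · have hms : m.toNat ≤ s.length := by omega
        cases hfind : pvFindSepA s m pvSeps with
        | some pos =>
          obtain ⟨p, hp1, hp2, hp3⟩ :=
            findSep_bounds t m hm pvSeps seps_good pos (by exact hfind)
          rw [← hsdef] at hp3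
          subst hp1
          rw [chunkA_succ_sep f t m _ hb hfind, chunkA_succ_sep t.length t m _ hb hfind]
          rw [PySem.List.slice_to_natCast, PySem.List.slice_from_natCast]
          have hl1 : (s.take p).length = p := by simp; omega
          have hl2 : (s.drop p).length = s.length - p := by simp
          obtain ⟨el, rl, hrl⟩ := IH f (by omega) (s.take p) (by omega)
          obtain ⟨er, rr, hrr⟩ := IH f (by omega) (s.drop p) (by omega)
          obtain ⟨el', rl', hrl'⟩ := IH t.length (by omega) (s.take p) (by omega)
          obtain ⟨er', rr', hrr'⟩ := IH t.length (by omega) (s.drop p) (by omega)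
          refine ⟨by rw [el, er, el', er'], ?_⟩
          refine ⟨(rl ++ rr).filter (fun pt => !pt.isEmpty), ?_⟩
          rw [hrl, hrr]
          rfl
        | none =>
          rw [chunkA_succ_nosep f t m hb hfind, chunkA_succ_nosep t.length t m hb hfind]
          rw [PySem.List.slice_from (a := m) s (by omega)]
          have hl3 : (s.drop m.toNat).length = s.length - m.toNat := by simp
          have hmt : 1 ≤ m.toNat := by omega
          obtain ⟨e1, r1, hr1⟩ := IH f (by omega) (s.drop m.toNat) (by omega)
          obtain ⟨e1', r1', hr1'⟩ := IH t.length (by omega) (s.drop m.toNat) (by omega)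
          refine ⟨by rw [e1, e1'],
            (PySem.Chars.strip (PySem.List.slice s none (some m)) :: r1).filter (fun pt => !pt.isEmpty), ?_⟩
          rw [hr1]
          rfl

lemma chunkA_eq_some_cAx (m : Int) (hm : 1 ≤ m) (fuel : Nat) (t : List Char)
    (h : t.length < fuel) : chunkA fuel t m = some (cAx m t) := by
  obtain ⟨heq, r, hr⟩ := chunkA_some_irrel m hm fuel t h
  have : cAx m t = r := by rw [cAx, ← heq, hr]; rfl
  rw [hr, this]

lemma loopB_nil (fuel : Nat) (m : Int) (acc : List (List Char)) :
    loopB fuel m [] acc = some acc := by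
  cases fuel <;> rfl

lemma loopB_cons_small (f : Nat) (m : Int) (cur : List Char) (rest acc : List (List Char))
    (hb : ((PySem.Chars.strip cur).length : Int) < m) :
    loopB (f + 1) m (cur :: rest) acc = loopB f m rest (acc ++ [PySem.Chars.strip cur]) := by
  rw [loopB]
  simp only [if_pos hb]

lemma loopB_cons_sep (f : Nat) (m : Int) (cur : List Char) (rest acc : List (List Char)) (pos : Int)
    (hb : ¬ ((PySem.Chars.strip cur).length : Int) < m)
    (hfind : pvScanSepsB (PySem.Chars.strip cur) m pvSeps = some pos) :
    loopB (f + 1) m (cur :: rest) acc =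
      loopB f m (PySem.List.slice (PySem.Chars.strip cur) none (some pos) ::
        PySem.List.slice (PySem.Chars.strip cur) (some pos) none :: rest) acc := by
  rw [loopB]
  simp only [if_neg hb, hfind]

lemma loopB_cons_nosep (f : Nat) (m : Int) (cur : List Char) (rest acc : List (List Char))
    (hb : ¬ ((PySem.Chars.strip cur).length : Int) < m)
    (hfind : pvScanSepsB (PySem.Chars.strip cur) m pvSeps = none) :
    loopB (f + 1) m (cur :: rest) acc =
      loopB f m (PySem.List.slice (PySem.Chars.strip cur) (some m) none :: rest)
        (acc ++ [PySem.Chars.strip (PySem.List.slice (PySem.Chars.strip cur) none (some m))]) := by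
  rw [loopB]
  simp only [if_neg hb, hfind]

lemma mu_cons (x : List Char) (l : List (List Char)) : mu (x :: l) = 4 ^ x.length + mu l := by
  simp [mu]

lemma loopB_bridge (m : Int) (hm : 1 ≤ m) :
    ∀ fuel stack acc, mu stack < fuel →
      ∃ res, loopB fuel m stack acc = some res ∧
        pvF res = pvF acc ++ stack.flatMap (fun t => pvF (cAx m t)) := by
  intro fuel
  induction fuel using Nat.strong_induction_on with
  | _ fuel IH =>
    intro stack acc hmu
    cases stack with
    | nil => exact ⟨acc, loopB_nil fuel m acc, by simp⟩
    | cons cur rest =>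
      have hpow : 0 < 4 ^ cur.length := pow_pos (by norm_num) _
      rw [mu_cons] at hmu
      match fuel, hmu with
      | f + 1, hmu =>
        have hsl : (PySem.Chars.strip cur).length ≤ cur.length := strip_length_le cur
        set s := PySem.Chars.strip cur with hsdef
        have hcAx : cAx m cur = (chunkA (cur.length + 1) cur m).getD [] := rfl
        by_cases hb : (s.length : Int) < m
        · -- leaf: emit the stripped piece
          rw [loopB_cons_small f m cur rest acc hb]
          obtain ⟨res, h1, h2⟩ := IH f (by omega) rest (acc ++ [s]) (by omega)
          refine ⟨res, h1, ?_⟩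
          rw [h2, pvF_append]
          have : cAx m cur = [s] := by rw [hcAx, chunkA_succ_small cur.length cur m hb]; rfl
          simp [this]
        · have hms : m.toNat ≤ s.length := by omega
          have hs1 : 1 ≤ s.length := by omega
          have hc1 : 0 < 4 ^ (s.length - 1) := pow_pos (by norm_num) _
          have hpows : 4 ^ (s.length - 1) * 4 = 4 ^ s.length := by
            rw [← pow_succ]
            congr 1
            omega
          have hpowc : 4 ^ s.length ≤ 4 ^ cur.length := Nat.pow_le_pow_right (by norm_num) hsl
          cases hfind : pvFindSepA s m pvSeps with
          | some pos =>
            obtain ⟨p, hp1, hp2, hp3⟩ :=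
              findSep_bounds cur m hm pvSeps seps_good pos (by exact hfind)
            rw [← hsdef] at hp3
            subst hp1
            rw [loopB_cons_sep f m cur rest acc _ hb (by rw [scan_eq_find]; exact hfind)]
            rw [PySem.List.slice_to_natCast, PySem.List.slice_from_natCast]
            have hl1 : (s.take p).length = p := by simp; omega
            have hl2 : (s.drop p).length = s.length - p := by simp
            have he1 : 4 ^ p ≤ 4 ^ (s.length - 1) := Nat.pow_le_pow_right (by norm_num) (by omega)
            have he2 : 4 ^ (s.length - p) ≤ 4 ^ (s.length - 1) :=
              Nat.pow_le_pow_right (by norm_num) (by omega)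
            obtain ⟨res, h1, h2⟩ := IH f (by omega) (s.take p :: s.drop p :: rest) acc
              (by rw [mu_cons, mu_cons, hl1, hl2]; omega)
            refine ⟨res, h1, ?_⟩
            rw [h2]
            have hchunk : chunkA (cur.length + 1) cur m = some
                ((cAx m (s.take p) ++ cAx m (s.drop p)).filter (fun pt => !pt.isEmpty)) := by
              rw [chunkA_succ_sep cur.length cur m _ hb hfind,
                PySem.List.slice_to_natCast, PySem.List.slice_from_natCast,
                chunkA_eq_some_cAx m hm cur.length (s.take p) (by omega),
                chunkA_eq_some_cAx m hm cur.length (s.drop p) (by omega)]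
              rfl
            have : cAx m cur = pvF (cAx m (s.take p) ++ cAx m (s.drop p)) := by
              rw [hcAx, hchunk]; rfl
            simp only [List.flatMap_cons]
            rw [this, pvF_idem, pvF_append]
            simp [List.append_assoc]
          | none =>
            rw [loopB_cons_nosep f m cur rest acc hb (by rw [scan_eq_find]; exact hfind)]
            rw [PySem.List.slice_from (a := m) s (by omega), PySem.List.slice_to (b := m) s (by omega)]
            have hl3 : (s.drop m.toNat).length = s.length - m.toNat := by simp
            have hmt : 1 ≤ m.toNat := by omega
            have he3 : 4 ^ (s.length - m.toNat) ≤ 4 ^ (s.length - 1) :=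
              Nat.pow_le_pow_right (by norm_num) (by omega)
            obtain ⟨res, h1, h2⟩ := IH f (by omega) (s.drop m.toNat :: rest)
              (acc ++ [PySem.Chars.strip (s.take m.toNat)]) (by rw [mu_cons, hl3]; omega)
            refine ⟨res, h1, ?_⟩
            rw [h2, pvF_append]
            have hchunk : chunkA (cur.length + 1) cur m = some
                ((PySem.Chars.strip (s.take m.toNat) :: cAx m (s.drop m.toNat)).filter
                  (fun pt => !pt.isEmpty)) := by
              rw [chunkA_succ_nosep cur.length cur m hb hfind,
                PySem.List.slice_from (a := m) s (by omega), PySem.List.slice_to (b := m) s (by omega),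
                chunkA_eq_some_cAx m hm cur.length (s.drop m.toNat) (by omega)]
              rfl
            have hcc : cAx m cur = pvF (PySem.Chars.strip (s.take m.toNat) :: cAx m (s.drop m.toNat)) := by
              rw [hcAx, hchunk]; rfl
            have hcons : pvF (PySem.Chars.strip (s.take m.toNat) :: cAx m (s.drop m.toNat)) =
                pvF [PySem.Chars.strip (s.take m.toNat)] ++ pvF (cAx m (s.drop m.toNat)) := by
              rw [← pvF_append]; rfl
            simp only [List.flatMap_cons]
            rw [hcc, pvF_idem, hcons]
            simp [List.append_assoc]

-- ===== VERDICT =====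
theorem chunk_respect_semantic_spec : Claim_equal_chunk_respect_semantic := by
  intro text m _hdom hpre
  have hm : 1 ≤ m := hpre
  unfold Spec_chunk_respect_semantic chunk_respect_semantic chunk_respect_semantic_alt
  simp only []
  have hsl : (PySem.Chars.strip text.toList).length ≤ text.toList.length := strip_length_le _
  set u := text.toList with hudef
  set s := PySem.Chars.strip u with hsdef
  have hss : PySem.Chars.strip s = s := strip_idem u
  by_cases hb : (s.length : Int) < m
  · rw [if_pos hb, chunkA_succ_small u.length u m hb]
    rfl
  · rw [if_neg hb]
    have hbs : ¬ ((PySem.Chars.strip s).length : Int) < m := by rw [hss]; exact hb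
    have hms : m.toNat ≤ s.length := by omega
    have hs1 : 1 ≤ s.length := by omega
    obtain ⟨res, h1, h2⟩ := loopB_bridge m hm (4 ^ s.length + 1) [s] [] (by simp [mu])
    rw [h1]
    have hres : ((some res).getD []).filter (fun p => !p.isEmpty) = pvF (cAx m s) := by
      have : pvF res = pvF (cAx m s) := by rw [h2]; simp [pvF]
      simpa [pvF] using this
    cases hfind : pvFindSepA s m pvSeps with
    | some pos =>
      obtain ⟨p, hp1, hp2, hp3⟩ :=
        findSep_bounds u m hm pvSeps seps_good pos (by exact hfind)
      rw [← hsdef] at hp3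
      subst hp1
      have hfind' : pvFindSepA (PySem.Chars.strip s) m pvSeps = some ((p : Nat) : Int) := by
        rw [hss]; exact hfind
      have hAu : chunkA (u.length + 1) u m = some
          (pvF (cAx m (s.take p) ++ cAx m (s.drop p))) := by
        rw [chunkA_succ_sep u.length u m _ hb hfind,
          PySem.List.slice_to_natCast, PySem.List.slice_from_natCast,
          chunkA_eq_some_cAx m hm u.length (s.take p) (by simp; omega),
          chunkA_eq_some_cAx m hm u.length (s.drop p) (by simp; omega)]
        rfl
      have hAs : chunkA (s.length + 1) s m = some
          (pvF (cAx m (s.take p) ++ cAx m (s.drop p))) := by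
        rw [chunkA_succ_sep s.length s m _ hbs hfind', hss,
          PySem.List.slice_to_natCast, PySem.List.slice_from_natCast,
          chunkA_eq_some_cAx m hm s.length (s.take p) (by simp; omega),
          chunkA_eq_some_cAx m hm s.length (s.drop p) (by simp; omega)]
        rfl
      rw [hres, hAu]
      have : cAx m s = pvF (cAx m (s.take p) ++ cAx m (s.drop p)) := by
        rw [cAx, hAs]; rfl
      rw [this, pvF_idem]
      rfl
    | none =>
      have hfind' : pvFindSepA (PySem.Chars.strip s) m pvSeps = none := by
        rw [hss]; exact hfind
      have hAu : chunkA (u.length + 1) u m = some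
          (pvF (PySem.Chars.strip (s.take m.toNat) :: cAx m (s.drop m.toNat))) := by
        rw [chunkA_succ_nosep u.length u m hb hfind,
          PySem.List.slice_from (a := m) s (by omega), PySem.List.slice_to (b := m) s (by omega),
          chunkA_eq_some_cAx m hm u.length (s.drop m.toNat) (by simp; omega)]
        rfl
      have hAs : chunkA (s.length + 1) s m = some
          (pvF (PySem.Chars.strip (s.take m.toNat) :: cAx m (s.drop m.toNat))) := by
        rw [chunkA_succ_nosep s.length s m hbs hfind', hss,
          PySem.List.slice_from (a := m) s (by omega), PySem.List.slice_to (b := m) s (by omega),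
          chunkA_eq_some_cAx m hm s.length (s.drop m.toNat) (by simp; omega)]
        rfl
      rw [hres, hAu]
      have : cAx m s = pvF (PySem.Chars.strip (s.take m.toNat) :: cAx m (s.drop m.toNat)) := by
        rw [cAx, hAs]; rfl
      rw [this, pvF_idem]
      rfl
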